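-- pv_equiv track=rewrite | github.com/jshart/AoCEngine | oldVersions/baseTest.py | decimalToAlphabeticLabel
-- ===== SOURCE A (Python) =====
-- def decimalToAlphabeticLabel(n):
--     if n == 0:
--         return "0"
--
--     alphabet = "ABCDEFGHIJKLMNOPQRSTUVWXYZ"
--     result = []
--
--     while n > 0:
--         n, remainder = divmod(n, 26)
--         result.append(alphabet[remainder])
--
--     return ''.join(reversed(result))
-- ===== SOURCE B (Python) =====
-- def decimalToAlphabeticLabel(n):
--     if n <= 0:
--         return "0" if n == 0 else ""
--     alphabet = "ABCDEFGHIJKLMNOPQRSTUVWXYZ"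
--     p = 1
--     while p * 26 <= n:
--         p *= 26
--     out = ""
--     while p > 0:
--         out += alphabet[(n // p) % 26]
--         p //= 26
--     return out
-- ===== Notes on version B (the rewrite author's own statement) =====
-- stated objective: alternative
-- what changed: Replaces A's least-significant-first divmod loop with list append and final reverse-and-join by a two-phase algorithm: first find the largest power of 26 not exceeding n, then emit digits most-significant-first by dividing by descending powers, so no list, reversal or join is needed.
import Mathlib
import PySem

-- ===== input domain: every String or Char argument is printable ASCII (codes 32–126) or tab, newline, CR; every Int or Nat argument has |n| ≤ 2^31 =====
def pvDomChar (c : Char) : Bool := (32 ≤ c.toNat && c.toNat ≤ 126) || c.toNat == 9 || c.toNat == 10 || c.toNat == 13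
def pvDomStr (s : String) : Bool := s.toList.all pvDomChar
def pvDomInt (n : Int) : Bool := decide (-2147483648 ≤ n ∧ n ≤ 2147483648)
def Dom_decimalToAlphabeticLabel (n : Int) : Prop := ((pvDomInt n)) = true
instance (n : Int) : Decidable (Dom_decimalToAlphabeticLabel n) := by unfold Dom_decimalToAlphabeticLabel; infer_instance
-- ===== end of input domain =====

-- B replaces A's least-significant-first divmod loop (append to a list, then reverse and join)
-- by a two-phase algorithm: find the largest power of 26 not exceeding n, then emit digits
-- most-significant-first by dividing by descending powers (objective: alternative).

-- termination helper (cited by the ports' decreasing_by)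
theorem pvAlbQuotLt (n : Int) (h : 0 < n) :
    (PySem.Int.floordiv n 26).toNat < n.toNat := by
  rw [PySem.Int.floordiv_eq_ediv_of_pos (by omega)]
  omega

-- ===== PORT A =====
-- A's while-loop: divmod(n, 26), append alphabet[remainder]; the index is always in
-- range when n > 0, so the .getD 'A' default is never used.
def albLoop (n : Int) (result : List Char) : List Char :=
  if h : 0 < n then
    albLoop (PySem.Int.floordiv n 26)
      (result ++ [(PySem.List.pyGet? "ABCDEFGHIJKLMNOPQRSTUVWXYZ".toList (PySem.Int.mod n 26)).getD 'A'])
  else result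
termination_by n.toNat
decreasing_by exact pvAlbQuotLt n h

def decimalToAlphabeticLabel (n : Int) : String :=
  if n = 0 then "0"
  else String.mk (albLoop n []).reverse   -- ''.join(reversed(result))

-- ===== PORT B =====
-- Source B's first loop: p = 1; while p*26 <= n: p *= 26.  The '0 < p' conjunct in the guard only
-- totalizes the recursion (p starts at 1 and only grows, so it always holds at every call).
def albPowLoop (n p : Int) : Int :=
  if h : p * 26 ≤ n ∧ 0 < p then albPowLoop n (p * 26) else p
termination_by (n - p).toNat
decreasing_by omega

-- Source B's second loop: while p > 0: out += alphabet[(n // p) % 26]; p //= 26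
def albMsdLoop (n p : Int) (out : List Char) : List Char :=
  if h : 0 < p then
    albMsdLoop n (PySem.Int.floordiv p 26)
      (out ++ [(PySem.List.pyGet? "ABCDEFGHIJKLMNOPQRSTUVWXYZ".toList
                  (PySem.Int.mod (PySem.Int.floordiv n p) 26)).getD 'A'])
  else out
termination_by p.toNat
decreasing_by exact pvAlbQuotLt p h

def decimalToAlphabeticLabel_alt (n : Int) : String :=
  if n ≤ 0 then (if n = 0 then "0" else "")
  else String.mk (albMsdLoop n (albPowLoop n 1) [])

-- ===== PRECONDITION & SPEC =====
def Spec_decimalToAlphabeticLabel (n : Int) (out : String) : Prop := out = decimalToAlphabeticLabel_alt n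
instance (n : Int) (out : String) : Decidable (Spec_decimalToAlphabeticLabel n out) := by unfold Spec_decimalToAlphabeticLabel; infer_instance

-- ===== CLAIM (what is proved, stated in full; the proofs are below) =====
def Claim_equal_decimalToAlphabeticLabel : Prop := ∀ (n : Int), Dom_decimalToAlphabeticLabel n → Spec_decimalToAlphabeticLabel n (decimalToAlphabeticLabel n)

-- ===== LEMMAS AND PROOFS =====

-- the digit character at value i
def pvCh (i : Int) : Char :=
  (PySem.List.pyGet? "ABCDEFGHIJKLMNOPQRSTUVWXYZ".toList i).getD 'A'

-- the k+1 digits of n at positions k..0, most-significant first (ediv/emod; n ≥ 0 in use)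
def pvDigits (n : Int) : Nat → List Char
  | 0 => [pvCh (n % 26)]
  | k+1 => pvCh ((n / 26 ^ (k+1)) % 26) :: pvDigits n k

theorem pvDigits_shift (n : Int) (k : Nat) :
    pvDigits (n / 26) k ++ [pvCh (n % 26)] = pvDigits n (k+1) := by
  induction k with
  | zero => simp [pvDigits]
  | succ k ih =>
      simp only [pvDigits, List.cons_append, ih]
      rw [Int.ediv_ediv_of_nonneg (by norm_num)]
      ring_nf

-- A's loop appends the LSB-first digit list after result
theorem albLoop_spec (n : Int) (acc : List Char) :
    albLoop n acc = acc ++ (albLoop n []) := by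
  by_cases h : 0 < n
  · rw [albLoop, dif_pos h, albLoop_spec _ (acc ++ _)]
    conv_rhs => rw [albLoop, dif_pos h, albLoop_spec _ ([] ++ _)]
    simp
  · rw [albLoop, dif_neg h]
    conv_rhs => rw [albLoop, dif_neg h]
    simp
termination_by n.toNat
decreasing_by all_goals exact pvAlbQuotLt n h

-- A's reversed digit list equals pvDigits when 26^k ≤ n < 26^(k+1)
theorem albLoop_reverse_eq (k : Nat) (n : Int)
    (hlo : (26:Int) ^ k ≤ n) (hhi : n < 26 ^ (k+1)) :
    (albLoop n []).reverse = pvDigits n k := by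
  induction k generalizing n with
  | zero =>
      simp only [pow_zero] at hlo
      have hhi' : n < 26 := by simpa using hhi
      rw [albLoop, dif_pos (by omega), albLoop, dif_neg (by
        rw [PySem.Int.floordiv_eq_ediv_of_pos (by omega)]; omega)]
      simp [pvDigits, pvCh, PySem.Int.mod_eq_emod_of_pos (by omega : (0:Int) < 26)]

  | succ k ih =>
      have hn : (0:Int) < n := lt_of_lt_of_le (by positivity) hlo
      rw [albLoop, dif_pos hn, albLoop_spec]
      rw [PySem.Int.floordiv_eq_ediv_of_pos (by omega)]
      have hlo' : (26:Int) ^ k ≤ n / 26 := by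
        rw [Int.le_ediv_iff_mul_le (by omega)]
        calc (26:Int)^k * 26 = 26^(k+1) := by ring
        _ ≤ n := hlo
      have hhi' : n / 26 < 26 ^ (k+1) := by
        rw [Int.ediv_lt_iff_lt_mul (by omega)]
        calc n < 26^(k+1+1) := hhi
        _ = 26^(k+1) * 26 := by ring
      rw [List.reverse_append, ih _ hlo' hhi']
      rw [PySem.Int.mod_eq_emod_of_pos (by omega : (0:Int) < 26)]
      simpa using pvDigits_shift n (k)

-- B's second loop run at p = 26^k emits pvDigits n k after out
theorem albMsdLoop_spec (k : Nat) (n : Int) (out : List Char) :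
    albMsdLoop n (26 ^ k) out = out ++ pvDigits n k := by
  induction k generalizing out with
  | zero =>
      rw [albMsdLoop, dif_pos (by norm_num), albMsdLoop, dif_neg (by decide)]
      simp [pvDigits, pvCh, PySem.Int.floordiv_eq_ediv_of_pos (by omega : (0:Int) < 1)]
  | succ k ih =>
      rw [albMsdLoop, dif_pos (by positivity)]
      have hp : PySem.Int.floordiv ((26:Int) ^ (k+1)) 26 = 26 ^ k := by
        rw [PySem.Int.floordiv_eq_ediv_of_pos (by omega), pow_succ,
          Int.mul_ediv_cancel _ (by omega)]
      rw [hp, ih]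
      simp [pvDigits, pvCh, PySem.Int.mod_eq_emod_of_pos (by omega : (0:Int) < 26)]

-- B's first loop finds the largest power of 26 not exceeding n
theorem albPowLoop_spec (n : Int) (k : Nat) (hk : (26:Int) ^ k ≤ n) :
    ∃ m : Nat, albPowLoop n (26 ^ k) = 26 ^ m ∧ (26:Int) ^ m ≤ n ∧ n < 26 ^ (m+1) := by
  rw [albPowLoop]
  by_cases h : (26:Int) ^ k * 26 ≤ n ∧ (0:Int) < 26 ^ k
  · rw [dif_pos h]
    have : (26:Int) ^ k * 26 = 26 ^ (k+1) := by ring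
    rw [this]
    exact albPowLoop_spec n (k+1) (this ▸ h.1)
  · rw [dif_neg h]
    refine ⟨k, rfl, hk, ?_⟩
    have hp : (0:Int) < 26 ^ k := by positivity
    have : ¬ (26:Int) ^ k * 26 ≤ n := fun hc => h ⟨hc, hp⟩
    calc n < 26 ^ k * 26 := by omega
    _ = 26 ^ (k+1) := by ring
termination_by (n - 26 ^ k).toNat
decreasing_by
  have hp : (0:Int) < 26 ^ k := by positivity
  have h26 : (26:Int) ^ k * 26 = 26 ^ (k+1) := by ring
  have : (26:Int) ^ k < 26 ^ (k+1) := by omega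
  omega

-- ===== VERDICT (by name: the statement is the Claim_ definition above) =====
theorem decimalToAlphabeticLabel_spec : Claim_equal_decimalToAlphabeticLabel := by
  intro n _
  unfold Spec_decimalToAlphabeticLabel decimalToAlphabeticLabel decimalToAlphabeticLabel_alt
  by_cases h0 : n = 0
  · simp [h0]
  · rw [if_neg h0]
    by_cases hneg : n ≤ 0
    · rw [if_pos hneg, if_neg h0, albLoop, dif_neg (by omega)]
      rfl
    · rw [if_neg hneg]
      have h1 : (26:Int) ^ 0 ≤ n := by simpa using (by omega : (1:Int) ≤ n)
      obtain ⟨m, hpow, hlo, hhi⟩ := albPowLoop_spec n 0 h1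
      have : albPowLoop n 1 = 26 ^ m := by simpa using hpow
      rw [this, albMsdLoop_spec, albLoop_reverse_eq m n hlo hhi]
      simp
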